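-- pv_equiv track=rewrite | github.com/reidpr/quac | lib/u.py | partition_sentinel
-- ===== SOURCE A (Python) =====
-- def partition_sentinel(iter_, sentinel):
--    '''Partition an iterable at the first occurrence of a sentinel; return two
--       lists containing each partition. The sentinel is not included in either.
--       For example:
--
--       >>> partition_sentinel([1,2,3,4], 2)
--       ([1], [3, 4])
--       >>> partition_sentinel([1,2,3,4], 'not_in_list')
--       ([1, 2, 3, 4], [])
--       >>> partition_sentinel([], 2)
--       ([], [])
--       >>> partition_sentinel([1,2,3,4], 4)
--       ([1, 2, 3], [])
--       >>> partition_sentinel([1,2,3,4], 1)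
--       ([], [2, 3, 4])
--       >>> partition_sentinel(8675309, 2)
--       Traceback (most recent call last):
--         ...
--       TypeError: 'int' object is not iterable'''
--    a = list()
--    iter2 = iter(iter_)
--    for i in iter2:
--       if (i == sentinel):
--          break
--       a.append(i)
--    b = list(iter2)
--    return (a, b)
-- ===== SOURCE B (Python) =====
-- def partition_sentinel(iter_, sentinel):
--     items = list(iter_)
--     try:
--         idx = items.index(sentinel)
--     except ValueError:
--         return (items, [])
--     return (items[:idx], items[idx+1:])
-- ===== Notes on version B (the rewrite author's own statement) =====
-- stated objective: simpler
-- what changed: Replaces A's streaming append-until-break loop over the iterator with materialize-then-index-and-slice: list(), .index() in try/except, and two slices.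
import Mathlib
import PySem

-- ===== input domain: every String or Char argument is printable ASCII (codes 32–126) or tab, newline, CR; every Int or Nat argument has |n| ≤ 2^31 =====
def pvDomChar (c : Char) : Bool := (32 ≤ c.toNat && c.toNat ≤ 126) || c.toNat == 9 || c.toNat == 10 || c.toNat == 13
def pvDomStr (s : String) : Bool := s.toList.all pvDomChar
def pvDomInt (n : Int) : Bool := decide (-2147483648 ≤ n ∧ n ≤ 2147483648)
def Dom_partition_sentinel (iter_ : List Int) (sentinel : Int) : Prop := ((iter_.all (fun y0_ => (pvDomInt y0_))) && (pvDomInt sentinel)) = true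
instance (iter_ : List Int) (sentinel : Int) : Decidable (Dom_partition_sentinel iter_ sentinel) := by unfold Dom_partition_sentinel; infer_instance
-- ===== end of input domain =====

-- B replaces A's streaming append-until-break loop with materialize-then-index-and-slice (objective: simpler); only a different decomposition, no speed claim.


-- ===== PORT A =====
-- loop: append until the sentinel, then the remaining iterator is b
def partition_sentinel_go (a : List Int) (rest : List Int) (sentinel : Int) : List Int × List Int :=
  match rest with
  | [] => (a, [])
  | i :: iter2 =>
      if i == sentinel then (a, iter2)
      else partition_sentinel_go (a ++ [i]) iter2 sentinel

def partition_sentinel (iter_ : List Int) (sentinel : Int) : List Int × List Int :=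
  partition_sentinel_go [] iter_ sentinel

-- ===== PORT B =====
def partition_sentinel_alt (iter_ : List Int) (sentinel : Int) : List Int × List Int :=
  let items := iter_
  match PySem.List.index? items sentinel with
  | none => (items, [])
  | some idx => (PySem.List.slice items none (some (idx : Int)),
                 PySem.List.slice items (some ((idx : Int) + 1)) none)

-- ===== PRECONDITION & SPEC =====
def Spec_partition_sentinel (iter_ : List Int) (sentinel : Int) (out : List Int × List Int) : Prop := out = partition_sentinel_alt iter_ sentinel
instance (iter_ : List Int) (sentinel : Int) (out : List Int × List Int) : Decidable (Spec_partition_sentinel iter_ sentinel out) := by unfold Spec_partition_sentinel; infer_instance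

-- ===== CLAIM (what is proved, stated in full; the proofs are below) =====
def Claim_equal_partition_sentinel : Prop := ∀ (iter_ : List Int) (sentinel : Int), Dom_partition_sentinel iter_ sentinel → Spec_partition_sentinel iter_ sentinel (partition_sentinel iter_ sentinel)

-- ===== LEMMAS AND PROOFS =====
lemma go_eq (rest a : List Int) (sentinel : Int) :
    partition_sentinel_go a rest sentinel =
      match List.idxOf? sentinel rest with
      | none => (a ++ rest, [])
      | some idx => (a ++ rest.take idx, rest.drop (idx + 1)) := by
  induction rest generalizing a with
  | nil => simp [partition_sentinel_go, List.idxOf?]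
  | cons x xs ih =>
      by_cases hx : x = sentinel
      · subst hx
        simp [partition_sentinel_go, List.idxOf?_cons]
      · have hb : (x == sentinel) = false := by simpa using hx
        simp only [partition_sentinel_go, hb, ih, List.idxOf?_cons]
        cases List.idxOf? sentinel xs with
        | none => simp
        | some k => simp [List.take_succ_cons]

-- ===== VERDICT (by name: the statement is the Claim_ definition above) =====
theorem partition_sentinel_spec : Claim_equal_partition_sentinel := by
  intro iter_ sentinel _
  unfold Spec_partition_sentinel partition_sentinel partition_sentinel_alt
  rw [go_eq]
  simp only [PySem.List.index?_eq_idxOf?]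
  cases h : List.idxOf? sentinel iter_ with
  | none => simp
  | some idx =>
      simp only [PySem.List.slice_to_natCast, List.nil_append]
      rw [show ((idx : Int) + 1) = ((idx + 1 : Nat) : Int) by push_cast; ring,
          PySem.List.slice_from_natCast]
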